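-- pv_equiv track=rewrite | github.com/pratikshadeo24/BitTorrent-P2P-FileSharing | bitfield_manager.py | decode_bitfield
-- ===== SOURCE A (Python) =====
-- def decode_bitfield(bitfield_bytes, num_pieces):
--     bitfield = []
--     total_bits = num_pieces
--     for byte in bitfield_bytes:
--         for i in range(8):
--             if len(bitfield) < total_bits:
--                 bitfield.append((byte >> (7 - i)) & 1)
--     return bitfield
-- ===== SOURCE B (Python) =====
-- def decode_bitfield(bitfield_bytes, num_pieces):
--     n = min(num_pieces, 8 * len(bitfield_bytes))
--     return [(bitfield_bytes[i // 8] >> (7 - i % 8)) & 1 for i in range(n)]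
-- ===== Notes on version B (the rewrite author's own statement) =====
-- stated objective: simpler
-- what changed: Replaces the nested byte/bit loops with a per-append length guard by a single flat list comprehension over a precomputed count n = min(num_pieces, 8*len(bytes)), indexing bytes by i//8 and shifting by 7 - i%8.
import Mathlib
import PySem

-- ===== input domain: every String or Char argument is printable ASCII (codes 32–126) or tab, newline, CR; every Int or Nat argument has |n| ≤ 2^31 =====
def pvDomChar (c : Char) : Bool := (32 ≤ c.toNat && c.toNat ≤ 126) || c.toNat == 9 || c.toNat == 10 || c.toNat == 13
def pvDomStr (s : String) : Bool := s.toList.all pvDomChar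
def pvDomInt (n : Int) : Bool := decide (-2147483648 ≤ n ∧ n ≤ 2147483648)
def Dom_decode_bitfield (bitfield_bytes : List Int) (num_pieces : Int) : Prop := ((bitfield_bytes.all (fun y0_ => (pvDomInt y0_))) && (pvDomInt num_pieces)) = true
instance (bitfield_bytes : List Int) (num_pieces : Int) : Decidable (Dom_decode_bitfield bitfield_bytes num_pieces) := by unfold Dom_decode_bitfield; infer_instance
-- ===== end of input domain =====

-- B replaces A's nested byte/bit loops with a guarded append by one flat map over a
-- precomputed count n = min(num_pieces, 8*len(bytes)) using index arithmetic (objective: simpler).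


-- ===== PORT A =====
def decode_bitfield (bitfield_bytes : List Int) (num_pieces : Int) : List Int :=
  let total_bits := num_pieces
  bitfield_bytes.foldl (fun bitfield (byte : Int) =>
    (List.range 8).foldl (fun bitfield (i : Nat) =>
      if (bitfield.length : Int) < total_bits then
        bitfield ++ [PySem.Int.band (byte >>> (7 - i)) 1]
      else bitfield) bitfield) []

-- ===== PORT B =====
def decode_bitfield_alt (bitfield_bytes : List Int) (num_pieces : Int) : List Int :=
  let n := min num_pieces (8 * (bitfield_bytes.length : Int))
  (List.range n.toNat).map (fun i =>
    PySem.Int.band ((bitfield_bytes.getD (i / 8) 0) >>> (7 - i % 8)) 1)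

-- ===== PRECONDITION & SPEC =====
def Spec_decode_bitfield (bitfield_bytes : List Int) (num_pieces : Int) (out : List Int) : Prop := out = decode_bitfield_alt bitfield_bytes num_pieces
instance (bitfield_bytes : List Int) (num_pieces : Int) (out : List Int) : Decidable (Spec_decode_bitfield bitfield_bytes num_pieces out) := by unfold Spec_decode_bitfield; infer_instance

-- ===== CLAIM (what is proved, stated in full; the proofs are below) =====
def Claim_equal_decode_bitfield : Prop := ∀ (bitfield_bytes : List Int) (num_pieces : Int), Dom_decode_bitfield bitfield_bytes num_pieces → Spec_decode_bitfield bitfield_bytes num_pieces (decode_bitfield bitfield_bytes num_pieces)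

-- ===== LEMMAS AND PROOFS =====

-- the bit B extracts at flat index i from the byte list
def pvF (bs : List Int) (i : Nat) : Int :=
  PySem.Int.band ((bs.getD (i / 8) 0) >>> (7 - i % 8)) 1

lemma pvF_lt8 (b : Int) (bs : List Int) (i : Nat) (h : i < 8) :
    pvF (b :: bs) i = PySem.Int.band (b >>> (7 - i)) 1 := by
  unfold pvF
  have h1 : i / 8 = 0 := Nat.div_eq_of_lt h
  have h2 : i % 8 = i := Nat.mod_eq_of_lt h
  simp [h1, h2]

lemma pvF_shift (b : Int) (bs : List Int) (i : Nat) :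
    pvF (b :: bs) (8 + i) = pvF bs i := by
  unfold pvF
  have h1 : (8 + i) / 8 = i / 8 + 1 := by omega
  have h2 : (8 + i) % 8 = i % 8 := by omega
  simp [h1, h2]

-- inner loop of A: appends the first min((tb - |acc|)⁺, m) bits of byte b
lemma pv_inner (tb b : Int) (m : Nat) (acc : List Int) :
    (List.range m).foldl (fun bitfield (i : Nat) =>
      if (bitfield.length : Int) < tb then
        bitfield ++ [PySem.Int.band (b >>> (7 - i)) 1]
      else bitfield) acc
    = acc ++ (List.range (min (tb - acc.length).toNat m)).map
        (fun (i : Nat) => PySem.Int.band (b >>> (7 - i)) 1) := by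
  induction m with
  | zero => simp
  | succ m ih =>
    rw [List.range_succ, List.foldl_append, ih]
    set c := (tb - acc.length).toNat with hc
    by_cases hlt : m < c
    · have hguard : ((acc ++ (List.range (min c m)).map
          (fun (i : Nat) => PySem.Int.band (b >>> (7 - i)) 1)).length : Int) < tb := by
        simp; omega
      rw [List.foldl_cons, List.foldl_nil, if_pos hguard]
      have : min c (m + 1) = min c m + 1 := by omega
      rw [this, List.range_succ, List.map_append]
      have : min c m = m := by omega
      simp [this]
    · have hguard : ¬ ((acc ++ (List.range (min c m)).map
          (fun (i : Nat) => PySem.Int.band (b >>> (7 - i)) 1)).length : Int) < tb := by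
        simp; omega
      rw [List.foldl_cons, List.foldl_nil, if_neg hguard]
      have : min c (m + 1) = min c m := by omega
      rw [this]

-- outer loop of A from an arbitrary accumulator
lemma pv_outer (bs : List Int) (tb : Int) (acc : List Int) :
    bs.foldl (fun bitfield (byte : Int) =>
      (List.range 8).foldl (fun bitfield (i : Nat) =>
        if (bitfield.length : Int) < tb then
          bitfield ++ [PySem.Int.band (byte >>> (7 - i)) 1]
        else bitfield) bitfield) acc
    = acc ++ (List.range (min (tb - acc.length).toNat (8 * bs.length))).map (pvF bs) := by
  induction bs generalizing acc with
  | nil => simp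
  | cons b bs ih =>
    rw [List.foldl_cons, pv_inner, ih]
    set c := (tb - acc.length).toNat with hc
    set k := min c 8 with hk
    have hlen : ((acc ++ (List.range k).map
        (fun (i : Nat) => PySem.Int.band (b >>> (7 - i)) 1)).length : Int) = acc.length + k := by
      simp
    rw [List.append_assoc]
    congr 1
    have hc' : (tb - ((acc ++ (List.range k).map
        (fun (i : Nat) => PySem.Int.band (b >>> (7 - i)) 1)).length : Int)).toNat
        = c - k := by
      rw [hlen]; omega
    rw [hc']
    by_cases h8 : c ≤ 8
    · -- byte b is the last (partial) byte consumed; nothing from bs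
      have hk8 : k = c := by omega
      have h1 : min (c - k) (8 * bs.length) = 0 := by omega
      have h2 : min c (8 * (b :: bs).length) = k := by
        simp [List.length_cons]; omega
      rw [h1, h2]
      simp only [List.range_zero, List.map_nil, List.append_nil]
      apply List.map_congr_left
      intro i hi
      rw [List.mem_range] at hi
      exact (pvF_lt8 b bs i (by omega)).symm
    · -- byte b fully consumed (k = 8), rest comes from bs shifted by 8
      have hk8 : k = 8 := by omega
      have h2 : min c (8 * (b :: bs).length) = 8 + min (c - k) (8 * bs.length) := by
        simp [List.length_cons]; omega
      rw [h2, List.range_add, List.map_append, hk8]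
      congr 1
      · symm
        rw [List.map_map]
        apply List.map_congr_left
        intro i _
        simp only [Function.comp_apply]
        exact pvF_shift b bs i

-- ===== VERDICT (by name: the statement is the Claim_ definition above) =====
theorem decode_bitfield_spec : Claim_equal_decode_bitfield := by
  intro bs np _
  unfold Spec_decode_bitfield decode_bitfield decode_bitfield_alt
  simp only []
  rw [pv_outer, List.nil_append]
  simp only [List.length_nil, Int.natCast_zero, Int.sub_zero]
  rw [show min np.toNat (8 * bs.length) = (min np (8 * (bs.length : Int))).toNat from by omega]
  rfl
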